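-- pv_equiv track=rewrite | github.com/meiordac/Interview | Code Fights!/jury_compatibility.py | jury_compability
-- ===== SOURCE A (Python) =====
-- def jury_compability(N, M, votes):
--   balance=[]
--   for j in range(M):
--     jurado=0
--     for n in range(2):
--       jurado+=votes[j][n]
--     balance.append(jurado)
--   for j in range(M):
--     if balance[j]>0:
--       return True
--   return False
-- ===== SOURCE B (Python) =====
-- def jury_compability(N, M, votes):
--     remaining = M
--     for row in votes:
--         if remaining <= 0:
--             break
--         remaining -= 1
--         if row[0] + row[1] > 0:
--             return True
--     return False
-- ===== Notes on version B (the rewrite author's own statement) =====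
-- stated objective: alternative
-- what changed: B replaces A's index-driven two-stage computation (build a balance table over range(M), then rescan it by index) with a single structural traversal of the rows themselves under a decrementing counter, returning early and keeping no intermediate list.
import Mathlib
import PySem

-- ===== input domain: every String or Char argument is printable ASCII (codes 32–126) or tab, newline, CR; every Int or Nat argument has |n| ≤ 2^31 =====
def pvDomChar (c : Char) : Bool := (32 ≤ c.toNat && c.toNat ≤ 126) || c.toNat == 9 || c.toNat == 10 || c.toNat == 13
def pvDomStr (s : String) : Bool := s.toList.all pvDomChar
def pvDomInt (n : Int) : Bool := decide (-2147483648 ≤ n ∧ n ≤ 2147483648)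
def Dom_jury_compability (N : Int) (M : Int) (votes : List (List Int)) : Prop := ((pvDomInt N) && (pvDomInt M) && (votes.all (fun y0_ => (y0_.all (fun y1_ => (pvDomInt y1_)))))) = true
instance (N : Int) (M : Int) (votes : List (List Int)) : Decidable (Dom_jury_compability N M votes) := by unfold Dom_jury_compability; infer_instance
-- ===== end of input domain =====

-- B replaces A's index-driven two-stage computation (build a balance table over range(M),
-- then rescan it by index) with one structural traversal of the rows under a decrementing
-- counter, early exit, no intermediate list; return values agree on Pre_.

-- ===== PORT A =====
def jury_compability (N : Int) (M : Int) (votes : List (List Int)) : Bool :=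
  -- balance = []; for j in range(M): jurado = 0; for n in range(2): jurado += votes[j][n]; balance.append(jurado)
  let balance := (PySem.List.pyRange 0 M 1).foldl
    (fun bal j =>
      bal ++ [(PySem.List.pyRange 0 2 1).foldl
        (fun jurado n => jurado + PySem.List.pyGetD (PySem.List.pyGetD votes j []) n 0) 0]) []
  -- for j in range(M): if balance[j] > 0: return True;  return False
  (PySem.List.pyRange 0 M 1).any (fun j => decide (0 < PySem.List.pyGetD balance j 0))

-- ===== PORT B =====
-- for row in votes: if remaining <= 0: break; remaining -= 1; if row[0]+row[1] > 0: return True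
-- structural recursion on the row list carrying the `remaining` counter
def juryScan (remaining : Int) (rows : List (List Int)) : Bool :=
  match rows with
  | [] => false
  | row :: rest =>
    if remaining ≤ 0 then false
    else if 0 < PySem.List.pyGetD row 0 0 + PySem.List.pyGetD row 1 0 then true
    else juryScan (remaining - 1) rest

def jury_compability_alt (N : Int) (M : Int) (votes : List (List Int)) : Bool :=
  juryScan M votes

-- ===== PRECONDITION & SPEC =====
-- Pre_ excludes exactly the inputs where Python A raises IndexError: M exceeding the number
-- of rows, or one of the first M rows having fewer than 2 entries.
def Pre_jury_compability (N : Int) (M : Int) (votes : List (List Int)) : Prop :=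
  0 < M → (M ≤ (votes.length : Int) ∧ ∀ r ∈ votes.take M.toNat, 2 ≤ r.length)
instance (N : Int) (M : Int) (votes : List (List Int)) : Decidable (Pre_jury_compability N M votes) := by
  unfold Pre_jury_compability; infer_instance

def pvWitness_jury_compability : Int × Int × List (List Int) := (4, 2, [[1, -2], [0, 3, 1]])

def Spec_jury_compability (N : Int) (M : Int) (votes : List (List Int)) (out : Bool) : Prop := out = jury_compability_alt N M votes
instance (N : Int) (M : Int) (votes : List (List Int)) (out : Bool) : Decidable (Spec_jury_compability N M votes out) := by unfold Spec_jury_compability; infer_instance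

-- ===== CLAIM (what is proved, stated in full; the proofs are below) =====
def Claim_equal_jury_compability : Prop := ∀ (N : Int) (M : Int) (votes : List (List Int)), Dom_jury_compability N M votes → Pre_jury_compability N M votes → Spec_jury_compability N M votes (jury_compability N M votes)

-- ===== LEMMAS AND PROOFS =====

-- the per-row test both programs decide
def juryPos (r : List Int) : Bool :=
  decide (0 < PySem.List.pyGetD r 0 0 + PySem.List.pyGetD r 1 0)

-- A's balance list is the map of the per-juror sum over range(M).
theorem jury_balance_eq (M : Int) (votes : List (List Int)) :
    (PySem.List.pyRange 0 M 1).foldl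
      (fun bal j =>
        bal ++ [(PySem.List.pyRange 0 2 1).foldl
          (fun jurado n => jurado + PySem.List.pyGetD (PySem.List.pyGetD votes j []) n 0) 0]) []
    = (PySem.List.pyRange 0 M 1).map
        (fun j => PySem.List.pyGetD (PySem.List.pyGetD votes j []) 0 0
                + PySem.List.pyGetD (PySem.List.pyGetD votes j []) 1 0) := by
  rw [PySem.List.foldl_append_singleton_eq_map]
  simp only [List.nil_append]
  apply List.map_congr_left
  intro j _
  have h2 : PySem.List.pyRange 0 2 1 = [0, 1] := by decide
  simp [h2]

-- B scans exactly the first `remaining` rows.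
theorem juryScan_eq_take (rows : List (List Int)) : ∀ (m : Int),
    juryScan m rows = (rows.take m.toNat).any juryPos := by
  induction rows with
  | nil => intro m; simp [juryScan]
  | cons r rest ih =>
    intro m
    by_cases hm : m ≤ 0
    · have h0 : m.toNat = 0 := by omega
      simp [juryScan, hm, h0]
    · have h1 : m.toNat = (m - 1).toNat + 1 := by omega
      rw [h1]
      simp only [juryScan, if_neg hm, List.take_succ_cons, List.any_cons, ih (m - 1)]
      by_cases hp : 0 < PySem.List.pyGetD r 0 0 + PySem.List.pyGetD r 1 0 <;>
        simp [juryPos, hp]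

-- an index scan over range(n) with a default-masked lookup equals a scan of take n,
-- provided the test rejects the default row
theorem range_any_getD (xs : List (List Int)) : ∀ (n : Nat),
    (List.range n).any (fun k => juryPos (xs.getD k [])) = (xs.take n).any juryPos := by
  intro n
  induction n with
  | zero => simp
  | succ n ih =>
    rw [List.range_succ, List.take_add_one]
    simp only [List.any_append, ih]
    by_cases h : n < xs.length
    · simp [h]
    · have hle : xs.length ≤ n := by omega
      have hd : xs.getD n [] = ([] : List Int) := List.getD_eq_default _ _ hle
      simp only [List.any_cons, List.any_nil, Bool.or_false, hd,
        List.getElem?_eq_none hle, Option.toList_none]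
      have hpos : juryPos ([] : List Int) = false := by decide
      simp [hpos]

theorem jury_compability_spec : Claim_equal_jury_compability := by
  intro N M votes _ _
  unfold Spec_jury_compability jury_compability jury_compability_alt
  rw [jury_balance_eq, juryScan_eq_take]
  have hA : (PySem.List.pyRange 0 M 1).any
      (fun j => decide (0 < PySem.List.pyGetD
          ((PySem.List.pyRange 0 M 1).map
            (fun j => PySem.List.pyGetD (PySem.List.pyGetD votes j []) 0 0
                    + PySem.List.pyGetD (PySem.List.pyGetD votes j []) 1 0)) j 0))
      = (PySem.List.pyRange 0 M 1).any (fun j => juryPos (PySem.List.pyGetD votes j [])) := by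
    apply PySem.List.any_congr_mem
    intro j hj
    have hmem := (PySem.List.mem_pyRange_one).mp hj
    rw [PySem.List.pyGetD_map_pyRange_of_nonneg _ M j 0 hmem.1 hmem.2]
    rfl
  rw [hA, PySem.List.pyRange_one]
  rw [List.any_map]
  have : ((fun j => juryPos (PySem.List.pyGetD votes j [])) ∘ fun k : Nat => (0 : Int) + k)
      = fun k : Nat => juryPos (votes.getD k []) := by
    funext k
    simp [PySem.List.pyGetD_natCast]
  rw [this]
  have hM : (M - 0).toNat = M.toNat := by omega
  rw [hM, range_any_getD]
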